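-- pv_equiv track=rewrite | github.com/standard-aaron/palm | palm/tree_utils.py | _branch_counts
-- ===== SOURCE A (Python) =====
-- def _branch_counts(coalTimes, timePts, eps=1):
-- 	## return number of lineages at each time point
-- 	n = len(coalTimes) + 1
-- 	C = [n]
--
-- 	for tp in timePts:
-- 		i = 0
-- 		for (j,ct) in enumerate(coalTimes[i:]):
-- 			if ct >= tp + eps:
-- 				i += j
-- 				C.append( n-j )
-- 				break
-- 	return C
-- ===== SOURCE B (Python) =====
-- def _branch_counts(coalTimes, timePts, eps=1):
--     ## Prefix maxima make "first index with coalTimes[j] >= t" monotone,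
--     ## so each time point is answered by binary search instead of a scan.
--     n = len(coalTimes) + 1
--     pm = []
--     m = None
--     for ct in coalTimes:
--         m = ct if (m is None or ct > m) else m
--         pm.append(m)
--     C = [n]
--     for tp in timePts:
--         t = tp + eps
--         lo, hi = 0, len(pm)
--         while lo < hi:
--             mid = (lo + hi) // 2
--             if pm[mid] < t:
--                 lo = mid + 1
--             else:
--                 hi = mid
--         if lo < len(pm):
--             C.append(n - lo)
--     return C
-- ===== Notes on version B (the rewrite author's own statement) =====
-- stated objective: faster
-- what changed: Instead of a linear scan over coalTimes for every time point, B precomputes the running (prefix) maxima once, which makes the predicate 'some earlier coalescence time >= tp+eps' monotone in the index, and answers each time point with a hand-written binary search over that prefix-max array.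
import Mathlib
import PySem

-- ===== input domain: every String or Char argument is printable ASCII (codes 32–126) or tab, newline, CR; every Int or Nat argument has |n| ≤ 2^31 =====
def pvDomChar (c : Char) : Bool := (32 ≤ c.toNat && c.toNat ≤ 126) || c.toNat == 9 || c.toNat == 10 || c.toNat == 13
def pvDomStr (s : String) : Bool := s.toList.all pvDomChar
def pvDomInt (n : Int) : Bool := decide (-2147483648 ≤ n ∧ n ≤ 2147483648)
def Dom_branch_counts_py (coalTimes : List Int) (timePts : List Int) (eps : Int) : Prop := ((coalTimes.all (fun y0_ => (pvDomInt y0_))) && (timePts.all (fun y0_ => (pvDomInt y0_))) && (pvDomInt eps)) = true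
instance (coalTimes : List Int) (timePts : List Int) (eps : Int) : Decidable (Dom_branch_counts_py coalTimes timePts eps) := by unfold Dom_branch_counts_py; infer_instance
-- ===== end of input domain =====

-- B replaces A's per-time-point linear scan by one prefix-maxima pass plus a binary search
-- per time point (objective: faster).

-- ===== PORT A =====
-- A's inner loop: enumerate(coalTimes[i:]) with i = 0 (the `i` variable is dead: it is set
-- just before `break` and reset to 0 for the next tp), first j with ct >= tp+eps, or no append.
def aInner (l : List Int) (t : Int) (j : Nat) : Option Nat :=
  match l with
  | [] => none
  | ct :: rest => if t ≤ ct then some j else aInner rest t (j + 1)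

def branch_counts_py (coalTimes : List Int) (timePts : List Int) (eps : Int) : List Int :=
  let n : Int := (coalTimes.length : Int) + 1
  timePts.foldl (fun C tp =>
    match aInner coalTimes (tp + eps) 0 with
    | some j => C ++ [n - (j : Int)]
    | none => C) [n]

-- ===== PORT B =====
-- running maxima of the list, seeded with (optional) current max m
def bPref (l : List Int) (m : Option Int) : List Int :=
  match l with
  | [] => []
  | ct :: rest =>
    let m' := match m with
      | none => ct
      | some mv => if mv < ct then ct else mv
    m' :: bPref rest (some m')

-- hand-written binary search from Source B: first index in [lo, hi) with t ≤ pm[idx], else hi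
def bSearch (pm : List Int) (t : Int) (lo hi : Nat) : Nat :=
  if _h : lo < hi then
    let mid := (lo + hi) / 2
    if pm.getD mid 0 < t then bSearch pm t (mid + 1) hi else bSearch pm t lo mid
  else lo
termination_by hi - lo
decreasing_by all_goals omega

def branch_counts_py_alt (coalTimes : List Int) (timePts : List Int) (eps : Int) : List Int :=
  let n : Int := (coalTimes.length : Int) + 1
  let pm := bPref coalTimes none
  timePts.foldl (fun C tp =>
    let lo := bSearch pm (tp + eps) 0 pm.length
    if lo < pm.length then C ++ [n - (lo : Int)] else C) [n]

-- ===== PRECONDITION & SPEC =====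
def Spec_branch_counts_py (coalTimes : List Int) (timePts : List Int) (eps : Int) (out : List Int) : Prop := out = branch_counts_py_alt coalTimes timePts eps
instance (coalTimes : List Int) (timePts : List Int) (eps : Int) (out : List Int) : Decidable (Spec_branch_counts_py coalTimes timePts eps out) := by unfold Spec_branch_counts_py; infer_instance

-- ===== CLAIM (what is proved, stated in full; the proofs are below) =====
def Claim_equal_branch_counts_py : Prop := ∀ (coalTimes : List Int) (timePts : List Int) (eps : Int), Dom_branch_counts_py coalTimes timePts eps → Spec_branch_counts_py coalTimes timePts eps (branch_counts_py coalTimes timePts eps)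

-- ===== LEMMAS AND PROOFS =====

theorem bPref_length (l : List Int) (m : Option Int) : (bPref l m).length = l.length := by
  induction l generalizing m with
  | nil => rfl
  | cons c rest ih => simp [bPref, ih]

theorem bPref_cons_none (c : Int) (rest : List Int) :
    bPref (c :: rest) none = bPref (c :: rest) (some c) := by
  simp [bPref]

theorem bPref_mem_ge (l : List Int) (mv : Int) :
    ∀ x ∈ bPref l (some mv), mv ≤ x := by
  induction l generalizing mv with
  | nil => simp [bPref]
  | cons c rest ih =>
    intro x hx
    simp only [bPref, List.mem_cons] at hx
    rcases hx with h | h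
    · subst h; split <;> omega
    · have := ih (if mv < c then c else mv) x h
      split at this <;> omega

theorem bPref_pairwise (l : List Int) (m : Option Int) :
    (bPref l m).Pairwise (· ≤ ·) := by
  induction l generalizing m with
  | nil => simp [bPref]
  | cons c rest ih =>
    simp only [bPref]
    exact List.pairwise_cons.mpr ⟨fun x hx => bPref_mem_ge rest _ x hx, ih _⟩

theorem bPref_mono (l : List Int) (m : Option Int) (i j : Nat)
    (hij : i ≤ j) (hj : j < (bPref l m).length) :
    (bPref l m)[i]'(by omega) ≤ (bPref l m)[j] := by
  rcases Nat.lt_or_ge i j with h | h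
  · exact List.Pairwise.rel_get_of_lt (bPref_pairwise l m)
      (a := ⟨i, by omega⟩) (b := ⟨j, hj⟩) h
  · have : i = j := by omega
    subst this; rfl

-- pm[i] < t ↔ (seed mv < t and all of l[0..i] < t)
theorem bPref_some_lt (l : List Int) (mv t : Int) (i : Nat) (hi : i < l.length) :
    (bPref l (some mv))[i]'(by rw [bPref_length]; omega) < t ↔
      (mv < t ∧ ∀ k, (hk : k ≤ i) → l[k]'(by omega) < t) := by
  induction l generalizing mv i with
  | nil => simp at hi
  | cons c rest ih =>
    simp only [bPref]
    cases i with
    | zero =>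
      simp only [List.getElem_cons_zero]
      constructor
      · intro h
        refine ⟨by split at h <;> omega, ?_⟩
        intro k hk; interval_cases k
        simp only [List.getElem_cons_zero]
        split at h <;> omega
      · rintro ⟨hmv, hall⟩
        have hc := hall 0 (Nat.le_refl 0)
        simp only [List.getElem_cons_zero] at hc
        split <;> omega
    | succ k =>
      simp only [List.getElem_cons_succ]
      rw [ih _ k (by simpa using hi)]
      constructor
      · rintro ⟨hm', hall⟩
        refine ⟨by split at hm' <;> omega, ?_⟩
        intro k' hk'
        cases k' with
        | zero =>
          simp only [List.getElem_cons_zero]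
          split at hm' <;> omega
        | succ k'' =>
          simp only [List.getElem_cons_succ]
          exact hall k'' (by omega)
      · rintro ⟨hmv, hall⟩
        have hc := hall 0 (by omega)
        simp only [List.getElem_cons_zero] at hc
        refine ⟨by split <;> omega, ?_⟩
        intro k' hk'
        have := hall (k' + 1) (by omega)
        simpa using this

theorem bPref_none_lt (l : List Int) (t : Int) (i : Nat) (hi : i < l.length) :
    (bPref l none)[i]'(by rw [bPref_length]; omega) < t ↔
      ∀ k, (hk : k ≤ i) → l[k]'(by omega) < t := by
  cases l with
  | nil => simp at hi
  | cons c rest =>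
    rw [List.getElem_of_eq (bPref_cons_none c rest), bPref_some_lt (c :: rest) c t i hi]
    constructor
    · rintro ⟨_, hall⟩; exact hall
    · intro hall
      refine ⟨?_, hall⟩
      have := hall 0 (Nat.zero_le _)
      simpa using this

-- binary-search invariant (the invariant the Source B loop maintains)
theorem bSearch_inv (pm : List Int) (t : Int)
    (mono : ∀ (i j : Nat) (hij : i ≤ j) (hj : j < pm.length), pm[i]'(by omega) ≤ pm[j])
    (lo hi : Nat) (hhi : hi ≤ pm.length) (hle : lo ≤ hi)
    (hhit : (h : hi < pm.length) → t ≤ pm[hi]) :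
    lo ≤ bSearch pm t lo hi ∧ bSearch pm t lo hi ≤ hi ∧
      (∀ i, (hip : i < pm.length) → lo ≤ i → i < bSearch pm t lo hi → pm[i] < t) ∧
      ((h : bSearch pm t lo hi < pm.length) → t ≤ pm[bSearch pm t lo hi]) := by
  by_cases h : lo < hi
  · have hmid : (lo + hi) / 2 < pm.length := by omega
    have hgd : pm.getD ((lo + hi) / 2) 0 = pm[(lo + hi) / 2] :=
      List.getD_eq_getElem pm 0 hmid
    by_cases hc : pm[(lo + hi) / 2] < t
    · have hrw : bSearch pm t lo hi = bSearch pm t ((lo + hi) / 2 + 1) hi := by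
        rw [bSearch]; rw [dif_pos h, if_pos (by rw [hgd]; exact hc)]
      obtain ⟨h1, h2, h3, h4⟩ := bSearch_inv pm t mono ((lo + hi) / 2 + 1) hi
        hhi (by omega) hhit
      rw [hrw]
      refine ⟨by omega, h2, ?_, h4⟩
      intro i hip hloi hir
      by_cases hi2 : (lo + hi) / 2 + 1 ≤ i
      · exact h3 i hip hi2 hir
      · have := mono i ((lo + hi) / 2) (by omega) hmid
        omega
    · have hrw : bSearch pm t lo hi = bSearch pm t lo ((lo + hi) / 2) := by
        rw [bSearch]; rw [dif_pos h, if_neg (by rw [hgd]; exact hc)]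
      obtain ⟨h1, h2, h3, h4⟩ := bSearch_inv pm t mono lo ((lo + hi) / 2)
        (by omega) (by omega) (fun _ => by omega)
      rw [hrw]
      exact ⟨h1, by omega, h3, h4⟩
  · have hrw : bSearch pm t lo hi = lo := by
      rw [bSearch]; rw [dif_neg h]
    rw [hrw]
    have hlohi : lo = hi := by omega
    refine ⟨le_refl _, by omega, by omega, ?_⟩
    intro hlt; exact hlohi ▸ hhit (by omega)
termination_by hi - lo
decreasing_by all_goals omega

-- A\'s inner scan, characterised by any index r with the first-hit property
theorem aInner_eq (l : List Int) (t : Int) (j r : Nat)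
    (hr : r ≤ l.length)
    (hlt : ∀ i, (h : i < r) → l[i]'(by omega) < t)
    (hge : (h : r < l.length) → t ≤ l[r]) :
    aInner l t j = if r < l.length then some (j + r) else none := by
  induction l generalizing j r with
  | nil =>
    have : r = 0 := by simpa using hr
    simp [aInner, this]
  | cons c rest ih =>
    cases r with
    | zero =>
      have hc : t ≤ c := by simpa using hge (by simp)
      simp [aInner, hc]
    | succ k =>
      have hc : c < t := by simpa using hlt 0 (by omega)
      show (if t ≤ c then some j else aInner rest t (j + 1)) = _
      rw [if_neg (by omega)]
      rw [ih (j + 1) k (by simpa using hr)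
        (fun i hI => by simpa using hlt (i + 1) (by omega))
        (fun h => by simpa using hge (by simpa using h))]
      simp only [List.length_cons]
      by_cases hk : k < rest.length
      · rw [if_pos hk, if_pos (by omega)]
        congr 1; omega
      · rw [if_neg hk, if_neg (by omega)]

-- per-time-point agreement of the two step computations
theorem step_eq (cts : List Int) (t : Int) (n : Int) (C : List Int) :
    (match aInner cts t 0 with
      | some j => C ++ [n - (j : Int)]
      | none => C) =
    (let pm := bPref cts none
     let lo := bSearch pm t 0 pm.length
     if lo < pm.length then C ++ [n - (lo : Int)] else C) := by
  set pm := bPref cts none with hpm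
  have hlen : pm.length = cts.length := bPref_length cts none
  obtain ⟨_, hr1, hr2, hr3⟩ := bSearch_inv pm t
    (fun i j hij hj => bPref_mono cts none i j hij hj)
    0 pm.length (le_refl _) (Nat.zero_le _) (fun h => by omega)
  set r := bSearch pm t 0 pm.length with hrdef
  have hlt' : ∀ i, (h : i < r) → cts[i]'(by omega) < t := by
    intro i hI
    have hp := hr2 i (by omega) (Nat.zero_le _) hI
    have := (bPref_none_lt cts t i (by omega)).mp hp
    exact this i (le_refl i)
  have hge' : (h : r < cts.length) → t ≤ cts[r] := by
    intro h
    have hnp : ¬ pm[r]'(by omega) < t := by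
      have := hr3 (by omega); omega
    rw [bPref_none_lt cts t r (by omega)] at hnp
    push Not at hnp
    obtain ⟨k, hk, hkt⟩ := hnp
    rcases Nat.lt_or_ge k r with hkr | hkr
    · exfalso
      have := hlt' k hkr
      omega
    · have : k = r := by omega
      subst this
      exact hkt
  rw [aInner_eq cts t 0 r (by omega) hlt' hge']
  simp only [Nat.zero_add]
  by_cases h : r < cts.length
  · rw [if_pos h, if_pos (by omega)]
  · rw [if_neg h, if_neg (by omega)]

-- ===== VERDICT (by name: the statement is the Claim_ definition above) =====
theorem branch_counts_py_spec : Claim_equal_branch_counts_py := by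
  intro coalTimes timePts eps _
  show branch_counts_py coalTimes timePts eps = branch_counts_py_alt coalTimes timePts eps
  unfold branch_counts_py branch_counts_py_alt
  simp only []
  congr 1
  funext C tp
  exact step_eq coalTimes (tp + eps) ((coalTimes.length : Int) + 1) C
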